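-- pv_equiv track=rewrite | github.com/raparicio6/simulacion | Tp2 Ej1.py | getTiemposDeEspera
-- ===== SOURCE A (Python) =====
-- def getTiemposDeEspera(duracionesDeProcesamientos, tiemposEntreArribos):
--     #La primera muestra no espera
--     tiemposDeEspera=[0]
--     for i in range(1, len(duracionesDeProcesamientos)):
--         espera = tiemposDeEspera[i-1] + duracionesDeProcesamientos[i-1] - tiemposEntreArribos[i]
--         if(espera < 0):
--             tiemposDeEspera.append(0)
--         else:
--             tiemposDeEspera.append(espera)
--     return tiemposDeEspera
-- ===== SOURCE B (Python) =====
-- def getTiemposDeEspera(duracionesDeProcesamientos, tiemposEntreArribos):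
--     # Prefix-sum / running-minimum formulation: wait[i] = S[i] - min(S[0..i]),
--     # where S is the cumulative sum of the per-step deltas d[i-1] - t[i]
--     # (S[0] = 0).  This closed form characterises the clamped recurrence
--     # max(0, w + x): the wait resets exactly at the running minimum of S.
--     prefijos = [0]
--     acc = 0
--     for i in range(1, len(duracionesDeProcesamientos)):
--         acc = acc + duracionesDeProcesamientos[i - 1] - tiemposEntreArribos[i]
--         prefijos.append(acc)
--     minimos = []
--     m = 0  # = prefijos[0]
--     for p in prefijos:
--         if p < m:
--             m = p
--         minimos.append(m)
--     return [p - m for p, m in zip(prefijos, minimos)]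
-- ===== Notes on version B (the rewrite author's own statement) =====
-- stated objective: alternative
-- what changed: A runs the clamped recurrence wait[i]=max(0,wait[i-1]+d[i-1]-t[i]) in one loop that indexes back into the output; B never clamps: it computes the cumulative delta sums S, their running minima, and returns S[i] - min(S[0..i]), the closed-form characterisation of the clamped scan.
import Mathlib
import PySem

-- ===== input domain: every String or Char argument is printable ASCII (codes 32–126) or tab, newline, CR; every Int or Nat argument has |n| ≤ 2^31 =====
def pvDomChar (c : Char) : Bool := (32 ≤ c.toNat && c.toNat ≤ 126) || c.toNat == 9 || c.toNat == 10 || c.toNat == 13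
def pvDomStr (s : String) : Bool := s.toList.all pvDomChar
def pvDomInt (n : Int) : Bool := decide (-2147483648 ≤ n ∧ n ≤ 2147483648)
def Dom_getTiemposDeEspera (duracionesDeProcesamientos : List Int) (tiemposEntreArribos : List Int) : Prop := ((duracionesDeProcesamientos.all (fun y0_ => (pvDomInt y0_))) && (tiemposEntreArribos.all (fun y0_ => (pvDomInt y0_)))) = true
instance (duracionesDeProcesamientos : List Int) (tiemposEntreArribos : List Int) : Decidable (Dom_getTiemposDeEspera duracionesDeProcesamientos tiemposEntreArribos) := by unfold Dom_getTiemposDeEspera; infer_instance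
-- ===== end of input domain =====

-- B replaces A's clamped recurrence by the closed form S[i] - min(S[0..i])
-- over the cumulative delta sums S, computed in three staged passes.

-- ===== PORT A =====
def getTiemposDeEspera (duracionesDeProcesamientos : List Int) (tiemposEntreArribos : List Int) : List Int :=
  (PySem.List.pyRange 1 duracionesDeProcesamientos.length 1).foldl
    (fun tiemposDeEspera i =>
      let espera := PySem.List.pyGetD tiemposDeEspera (i - 1) 0
        + PySem.List.pyGetD duracionesDeProcesamientos (i - 1) 0
        - PySem.List.pyGetD tiemposEntreArribos i 0
      if espera < 0 then tiemposDeEspera ++ [0] else tiemposDeEspera ++ [espera])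
    [0]

-- ===== PORT B =====
def getTiemposDeEspera_alt (duracionesDeProcesamientos : List Int) (tiemposEntreArribos : List Int) : List Int :=
  let prefijos := ((PySem.List.pyRange 1 duracionesDeProcesamientos.length 1).foldl
    (fun (s : List Int × Int) i =>
      let acc := s.2 + PySem.List.pyGetD duracionesDeProcesamientos (i - 1) 0
        - PySem.List.pyGetD tiemposEntreArribos i 0
      (s.1 ++ [acc], acc)) ([0], 0)).1
  let minimos := (prefijos.foldl
    (fun (s : List Int × Int) p =>
      let m := if p < s.2 then p else s.2
      (s.1 ++ [m], m)) ([], 0)).1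
  List.zipWith (· - ·) prefijos minimos

-- ===== PRECONDITION & SPEC =====
-- Pre_ excludes exactly the inputs where A raises IndexError:
-- tiemposEntreArribos shorter than duracionesDeProcesamientos (with ≥ 2 processes).
def Pre_getTiemposDeEspera (duracionesDeProcesamientos : List Int) (tiemposEntreArribos : List Int) : Prop :=
  duracionesDeProcesamientos.length ≤ tiemposEntreArribos.length ∨ duracionesDeProcesamientos.length ≤ 1
instance (duracionesDeProcesamientos : List Int) (tiemposEntreArribos : List Int) : Decidable (Pre_getTiemposDeEspera duracionesDeProcesamientos tiemposEntreArribos) := by unfold Pre_getTiemposDeEspera; infer_instance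
def pvWitness_getTiemposDeEspera : List Int × List Int := ([2, 3, 1], [0, 1, 4])
def Spec_getTiemposDeEspera (duracionesDeProcesamientos : List Int) (tiemposEntreArribos : List Int) (out : List Int) : Prop := out = getTiemposDeEspera_alt duracionesDeProcesamientos tiemposEntreArribos
instance (duracionesDeProcesamientos : List Int) (tiemposEntreArribos : List Int) (out : List Int) : Decidable (Spec_getTiemposDeEspera duracionesDeProcesamientos tiemposEntreArribos out) := by unfold Spec_getTiemposDeEspera; infer_instance

-- ===== CLAIM (what is proved, stated in full; the proofs are below) =====
def Claim_equal_getTiemposDeEspera : Prop := ∀ (duracionesDeProcesamientos : List Int) (tiemposEntreArribos : List Int), Dom_getTiemposDeEspera duracionesDeProcesamientos tiemposEntreArribos → Pre_getTiemposDeEspera duracionesDeProcesamientos tiemposEntreArribos → Spec_getTiemposDeEspera duracionesDeProcesamientos tiemposEntreArribos (getTiemposDeEspera duracionesDeProcesamientos tiemposEntreArribos)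

-- ===== LEMMAS AND PROOFS =====

-- A's loop body and B's two fold bodies, named for the invariant proof.
def pvStepA (d t : List Int) (te : List Int) (i : Int) : List Int :=
  if PySem.List.pyGetD te (i - 1) 0 + PySem.List.pyGetD d (i - 1) 0
      - PySem.List.pyGetD t i 0 < 0 then te ++ [0]
  else te ++ [PySem.List.pyGetD te (i - 1) 0 + PySem.List.pyGetD d (i - 1) 0
      - PySem.List.pyGetD t i 0]

def pvStepP (d t : List Int) (s : List Int × Int) (i : Int) : List Int × Int :=
  (s.1 ++ [s.2 + PySem.List.pyGetD d (i - 1) 0 - PySem.List.pyGetD t i 0],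
   s.2 + PySem.List.pyGetD d (i - 1) 0 - PySem.List.pyGetD t i 0)

def pvStepM (s : List Int × Int) (p : Int) : List Int × Int :=
  (s.1 ++ [if p < s.2 then p else s.2], if p < s.2 then p else s.2)

-- Reading the element just appended at the old length.
theorem pyGetD_append_singleton_length (xs : List Int) (a d : Int) :
    PySem.List.pyGetD (xs ++ [a]) ((xs.length : Int)) d = a := by
  rw [PySem.List.pyGetD_eq_getElem _ _ (by positivity) (by simp)]
  simp

-- Joint invariant over n: A's fold equals zipWith (·-·) of B's prefix list and
-- running-minimum list; lengths agree; the two accumulators are the last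
-- prefix sum and the running minimum, with min ≤ prefix; and A's last entry is
-- their difference.
theorem inv_lemma (d t : List Int) (n : Nat) :
    let P := (PySem.List.pyRange 1 n 1).foldl (pvStepP d t) ([0], 0)
    let M := P.1.foldl pvStepM ([], 0)
    let A := (PySem.List.pyRange 1 n 1).foldl (pvStepA d t) [0]
    A = List.zipWith (· - ·) P.1 M.1
    ∧ P.1.length = max 1 n ∧ M.1.length = max 1 n
    ∧ M.2 ≤ P.2
    ∧ PySem.List.pyGetD A ((n : Int) - 1) 0 = P.2 - M.2 := by
  induction n with
  | zero =>
    have h : PySem.List.pyRange 1 ((0 : Nat) : Int) 1 = [] :=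
      PySem.List.pyRange_one_eq_nil (by norm_num)
    simp only [h, List.foldl_nil]
    refine ⟨rfl, rfl, rfl, le_refl _, ?_⟩
    have := PySem.List.pyGetD_neg_one ([0] : List Int) 0 (by simp)
    simpa [pvStepM] using this
  | succ m ih =>
    rcases Nat.eq_zero_or_pos m with hm | hm
    · subst hm
      have h : PySem.List.pyRange 1 ((1 : Nat) : Int) 1 = [] :=
        PySem.List.pyRange_one_eq_nil (by norm_num)
      simp only [h, List.foldl_nil]
      refine ⟨rfl, rfl, rfl, le_refl _, ?_⟩
      simp [pvStepM, PySem.List.pyGetD_zero]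
    · simp only at ih
      obtain ⟨hA, hLP, hLM, hml, hlast⟩ := ih
      have hcast : ((m + 1 : Nat) : Int) = (m : Int) + 1 := by push_cast; ring
      have hsplit : PySem.List.pyRange 1 ((m : Int) + 1) 1
          = PySem.List.pyRange 1 (m : Int) 1 ++ [(m : Int)] :=
        PySem.List.pyRange_one_succ_right (by omega)
      simp only [hcast, hsplit, List.foldl_append, List.foldl_cons, List.foldl_nil]
      set P := (PySem.List.pyRange 1 (m : Int) 1).foldl (pvStepP d t) ([0], 0) with hP
      set A := (PySem.List.pyRange 1 (m : Int) 1).foldl (pvStepA d t) [0] with hAdef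
      set M := P.1.foldl pvStepM ([], 0) with hM
      set p' := P.2 + PySem.List.pyGetD d ((m : Int) - 1) 0 - PySem.List.pyGetD t (m : Int) 0 with hp'
      have hstepP : pvStepP d t P (m : Int) = (P.1 ++ [p'], p') := rfl
      rw [hstepP]
      have hMstep : (P.1 ++ [p']).foldl pvStepM ([], 0)
          = pvStepM M p' := by rw [List.foldl_append]; rfl
      rw [hMstep]
      set m'' := if p' < M.2 then p' else M.2 with hm''
      have hstepM : pvStepM M p' = (M.1 ++ [m''], m'') := rfl
      rw [hstepM]
      have hlenA : A.length = m := by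
        rw [hA]; rw [List.length_zipWith, hLP, hLM]; omega
      have hstepA : pvStepA d t A (m : Int) = A ++ [p' - m''] := by
        unfold pvStepA
        have he : PySem.List.pyGetD A ((m : Int) - 1) 0 + PySem.List.pyGetD d ((m : Int) - 1) 0
            - PySem.List.pyGetD t (m : Int) 0 = p' - M.2 := by
          rw [hlast, hp']; ring
        rw [he]
        by_cases h : p' < M.2
        · rw [if_pos (by omega), hm'', if_pos h]; simp
        · rw [if_neg (by omega), hm'', if_neg h]
      rw [hstepA]
      refine ⟨?_, ?_, ?_, ?_, ?_⟩
      · rw [hA, List.zipWith_append (h := by rw [hLP, hLM])]; rfl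
      · simp only [List.length_append, List.length_cons, List.length_nil, hLP]; omega
      · simp only [List.length_append, List.length_cons, List.length_nil, hLM]; omega
      · rw [hm'']; split <;> omega
      · have hidx : ((m : Int) + 1 - 1) = (A.length : Int) := by rw [hlenA]; omega
        rw [hidx]
        exact pyGetD_append_singleton_length _ _ _

-- ===== VERDICT (by name: the statement is the Claim_ definition above) =====
theorem getTiemposDeEspera_spec : Claim_equal_getTiemposDeEspera := by
  intro d t _ _
  unfold Spec_getTiemposDeEspera getTiemposDeEspera getTiemposDeEspera_alt
  exact (inv_lemma d t d.length).1
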